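-- pv_equiv track=rewrite | github.com/PSmaruj/akita_semifreddo | suppressing_CTCFs/analyze_b2_context_filters.py | check_homopolymers
-- ===== SOURCE A (Python) =====
-- def check_homopolymers(consensus, min_run=3):
--     """Check for homopolymer runs in consensus sequence."""
--     runs = []
--     current_base = consensus[0]
--     current_len = 1
--
--     for b in consensus[1:]:
--         if b == current_base:
--             current_len += 1
--         else:
--             if current_len >= min_run:
--                 runs.append((current_base, current_len))
--             current_base = b
--             current_len = 1
--     if current_len >= min_run:
--         runs.append((current_base, current_len))
--
--     return runs
-- ===== SOURCE B (Python) =====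
-- def check_homopolymers(consensus, min_run=3):
--     """Check for homopolymer runs in consensus sequence."""
--     runs = []
--     i, n = 0, len(consensus)
--     while i < n:
--         j = i
--         while j < n and consensus[j] == consensus[i]:
--             j += 1
--         if j - i >= min_run:
--             runs.append((consensus[i], j - i))
--         i = j
--     return runs
-- ===== Notes on version B (the rewrite author's own statement) =====
-- stated objective: alternative
-- what changed: Two-pointer run-boundary scan (inner loop finds where each run ends, then emits it) replaces A's running-counter state machine with its trailing flush.
import Mathlib
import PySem

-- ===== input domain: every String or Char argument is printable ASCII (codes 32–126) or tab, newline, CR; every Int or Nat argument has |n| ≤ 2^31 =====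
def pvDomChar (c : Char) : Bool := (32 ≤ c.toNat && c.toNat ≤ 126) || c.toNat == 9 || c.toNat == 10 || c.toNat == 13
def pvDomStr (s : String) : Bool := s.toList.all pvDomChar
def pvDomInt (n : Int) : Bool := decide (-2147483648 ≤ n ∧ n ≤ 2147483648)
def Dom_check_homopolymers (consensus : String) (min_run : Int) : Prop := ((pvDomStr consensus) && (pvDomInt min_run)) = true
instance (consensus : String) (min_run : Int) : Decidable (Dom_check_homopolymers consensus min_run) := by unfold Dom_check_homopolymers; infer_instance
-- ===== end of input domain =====

-- B replaces A's running-counter state machine by a two-pointer run-boundary scan (alternative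
-- decomposition, same cost). A raises IndexError on the empty string; Pre_ excludes it and B returns [] there.

-- ===== PORT A =====
-- A's for-loop over consensus[1:] with state (runs, current_base, current_len), then the trailing flush.
def goA (min_run : Int) (runs : List (String × Int)) (cb : Char) (cl : Int) :
    List Char → List (String × Int)
  | [] => if cl ≥ min_run then runs ++ [(String.ofList [cb], cl)] else runs
  | b :: rest =>
      if b == cb then goA min_run runs cb (cl + 1) rest
      else goA min_run (if cl ≥ min_run then runs ++ [(String.ofList [cb], cl)] else runs) b 1 rest

def check_homopolymers (consensus : String) (min_run : Int) : List (String × Int) :=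
  match consensus.toList with
  | [] => []   -- Python raises IndexError at consensus[0]; excluded by Pre_
  | c :: rest => goA min_run [] c 1 rest

-- ===== PORT B =====
-- inner while loop: count how far the current run of c extends, return (extra length, remainder)
def countRun (c : Char) : List Char → Nat × List Char
  | [] => (0, [])
  | b :: rest =>
      if b == c then
        let p := countRun c rest
        (p.1 + 1, p.2)
      else (0, b :: rest)

theorem countRun_len_le (c : Char) (l : List Char) : (countRun c l).2.length ≤ l.length := by
  induction l with
  | nil => simp [countRun]
  | cons b rest ih =>
      by_cases h : (b == c) = true <;> simp [countRun, h]
      exact Nat.le_succ_of_le ih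

-- outer while loop: emit each run (if long enough) and continue past it
def goB (min_run : Int) : List Char → List (String × Int)
  | [] => []
  | c :: rest =>
      let p := countRun c rest
      (if ((p.1 : Int) + 1) ≥ min_run then [(String.ofList [c], (p.1 : Int) + 1)] else []) ++
        goB min_run p.2
termination_by l => l.length
decreasing_by
  exact Nat.lt_succ_of_le (countRun_len_le c rest)

def check_homopolymers_alt (consensus : String) (min_run : Int) : List (String × Int) :=
  goB min_run consensus.toList

-- ===== PRECONDITION & SPEC =====
-- Pre_ excludes exactly the empty string, on which Python A raises IndexError.
def Pre_check_homopolymers (consensus : String) (min_run : Int) : Prop := consensus ≠ ""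
instance (consensus : String) (min_run : Int) : Decidable (Pre_check_homopolymers consensus min_run) := by
  unfold Pre_check_homopolymers; infer_instance

def pvWitness_check_homopolymers : String × Int := ("AAAB", 3)

def Spec_check_homopolymers (consensus : String) (min_run : Int) (out : List (String × Int)) : Prop :=
  out = check_homopolymers_alt consensus min_run
instance (consensus : String) (min_run : Int) (out : List (String × Int)) :
    Decidable (Spec_check_homopolymers consensus min_run out) := by
  unfold Spec_check_homopolymers; infer_instance

-- ===== CLAIM (what is proved, stated in full; the proofs are below) =====
def Claim_equal_check_homopolymers : Prop := ∀ (consensus : String) (min_run : Int), Dom_check_homopolymers consensus min_run → Pre_check_homopolymers consensus min_run → Spec_check_homopolymers consensus min_run (check_homopolymers consensus min_run)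


-- ===== LEMMAS AND PROOFS =====

-- A's accumulator only ever receives appends
theorem goA_acc (min_run : Int) (runs : List (String × Int)) (cb : Char) (cl : Int)
    (l : List Char) : goA min_run runs cb cl l = runs ++ goA min_run [] cb cl l := by
  induction l generalizing runs cb cl with
  | nil => by_cases h : cl ≥ min_run <;> simp [goA, h]
  | cons b rest ih =>
      by_cases h : (b == cb) = true
      · simp only [goA, h, if_pos]
        rw [ih]
      · simp only [goA, h, Bool.false_eq_true, if_false]
        rw [ih, ih (if cl ≥ min_run then [] ++ [(String.ofList [cb], cl)] else [])]
        by_cases h2 : cl ≥ min_run <;> simp [h2]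

-- A's state machine, run from state (cb, cl), equals: finish the current run, then B's scan
theorem goA_eq (min_run : Int) (cb : Char) (cl : Int) (l : List Char) :
    goA min_run [] cb cl l =
      (if cl + ((countRun cb l).1 : Int) ≥ min_run
        then [(String.ofList [cb], cl + ((countRun cb l).1 : Int))] else []) ++
        goB min_run (countRun cb l).2 := by
  induction l generalizing cb cl with
  | nil => by_cases h : cl ≥ min_run <;> simp [goA, countRun, goB, h]
  | cons b rest ih =>
      by_cases h : (b == cb) = true
      · simp only [goA, h, if_pos, countRun]
        rw [ih cb (cl + 1)]
        have harith : cl + 1 + (((countRun cb rest).1 : Nat) : Int)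
            = cl + (((countRun cb rest).1 + 1 : Nat) : Int) := by push_cast; ring
        rw [harith]
      · simp only [goA, h, Bool.false_eq_true, if_false, countRun]
        rw [goA_acc, ih b 1]
        rw [show goB min_run (b :: rest)
            = (if ((countRun b rest).1 : Int) + 1 ≥ min_run
                then [(String.ofList [b], ((countRun b rest).1 : Int) + 1)] else []) ++
              goB min_run (countRun b rest).2 from by rw [goB]]
        have harith : (1 : Int) + ((countRun b rest).1 : Int)
            = ((countRun b rest).1 : Int) + 1 := by ring
        rw [harith]
        by_cases h2 : cl ≥ min_run <;> simp [h2]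

-- ===== VERDICT (by name: the statement is the Claim_ definition above) =====
theorem check_homopolymers_spec : Claim_equal_check_homopolymers := by
  intro consensus min_run _ hpre
  unfold Spec_check_homopolymers check_homopolymers check_homopolymers_alt
  cases hc : consensus.toList with
  | nil => exact absurd (String.toList_eq_nil_iff.mp hc) hpre
  | cons c rest =>
      show goA min_run [] c 1 rest = goB min_run (c :: rest)
      rw [goA_eq, goB]
      rw [show (1 : Int) + ((countRun c rest).1 : Int)
          = ((countRun c rest).1 : Int) + 1 from by ring]
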